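-- pv_equiv track=rewrite | github.com/nikbhor/Python | Program30.py | Count
-- ===== SOURCE A (Python) =====
-- def Count(iNo):
--     iCnt = 0
--     if iNo < 0:
--        iNo = -iNo
--
--     while iNo != 0:
--           iDigit = iNo % 10
--           if iDigit >= 5:
--              iCnt+= 1
--           iNo//=10
--     return iCnt
-- ===== SOURCE B (Python) =====
-- def Count(iNo):
--     return sum(1 for c in str(abs(iNo)) if c >= '5')
-- ===== Notes on version B (the rewrite author's own statement) =====
-- stated objective: idiomatic
-- what changed: B converts the absolute value to its decimal string once and counts characters >= '5' in one comprehension, instead of arithmetically peeling off digits with %10 and //10 in a while loop.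
import Mathlib
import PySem

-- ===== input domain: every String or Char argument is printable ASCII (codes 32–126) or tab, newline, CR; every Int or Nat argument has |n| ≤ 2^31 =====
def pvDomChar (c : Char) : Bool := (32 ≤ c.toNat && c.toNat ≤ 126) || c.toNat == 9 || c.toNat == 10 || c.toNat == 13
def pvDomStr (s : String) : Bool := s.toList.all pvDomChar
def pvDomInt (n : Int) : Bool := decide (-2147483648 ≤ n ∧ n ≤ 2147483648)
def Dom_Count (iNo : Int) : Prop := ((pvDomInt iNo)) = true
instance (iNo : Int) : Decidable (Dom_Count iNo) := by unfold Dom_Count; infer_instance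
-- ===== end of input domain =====

-- B converts the absolute value to its decimal string once and counts characters ≥ '5',
-- instead of A's arithmetic digit-peeling loop with %10 and //10 (idiomatic; same cost).


-- ===== PORT A =====
-- the while loop; the hypothesis 0 ≤ iNo only serves termination (the loop is entered
-- with a nonnegative value, exactly as in the Python after the sign flip)
def CountLoop (iNo : Int) (iCnt : Int) (h : 0 ≤ iNo) : Int :=
  if hz : iNo ≠ 0 then
    have hfd : PySem.Int.floordiv iNo 10 = iNo / 10 :=
      PySem.Int.floordiv_eq_ediv_of_pos (by norm_num)
    let iDigit := PySem.Int.mod iNo 10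
    CountLoop (PySem.Int.floordiv iNo 10)
      (if iDigit ≥ 5 then iCnt + 1 else iCnt)
      (by rw [hfd]; omega)
  else iCnt
termination_by iNo.toNat
decreasing_by rw [hfd]; omega

def Count (iNo : Int) : Int :=
  if _h : iNo < 0 then CountLoop (-iNo) 0 (by omega)
  else CountLoop iNo 0 (by omega)

-- ===== PORT B =====
def Count_alt (iNo : Int) : Int :=
  (((PySem.Int.toStr |iNo|).toList.countP (fun c => decide ('5' ≤ c))) : Int)

-- ===== PRECONDITION & SPEC =====
def Spec_Count (iNo : Int) (out : Int) : Prop := out = Count_alt iNo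
instance (iNo : Int) (out : Int) : Decidable (Spec_Count iNo out) := by unfold Spec_Count; infer_instance

-- ===== CLAIM (what is proved, stated in full; the proofs are below) =====
def Claim_equal_Count : Prop := ∀ (iNo : Int), Dom_Count iNo → Spec_Count iNo (Count iNo)

-- ===== LEMMAS AND PROOFS =====

-- arithmetic digit-count, used to characterise both ports
def pvCnt (n : Nat) : Nat :=
  if h : n = 0 then 0
  else (if 5 ≤ n % 10 then 1 else 0) + pvCnt (n / 10)
termination_by n
decreasing_by exact Nat.div_lt_self (Nat.pos_of_ne_zero h) (by norm_num)

lemma pvDigitChar_ge5 (d : Nat) (hd : d < 10) :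
    (decide ('5' ≤ Nat.digitChar d)) = decide (5 ≤ d) := by
  interval_cases d <;> decide

lemma pvToDigitsCore_append (fuel n : Nat) (ds : List Char) :
    Nat.toDigitsCore 10 fuel n ds = Nat.toDigitsCore 10 fuel n [] ++ ds := by
  induction fuel generalizing n ds with
  | zero => simp [Nat.toDigitsCore]
  | succ f ih =>
    simp only [Nat.toDigitsCore]
    by_cases h : n / 10 = 0
    · simp [h]
    · simp only [h, if_false]
      rw [ih (n / 10) (Nat.digitChar (n % 10) :: ds),
          ih (n / 10) [Nat.digitChar (n % 10)], List.append_assoc]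
      rfl

lemma pvCnt_zero : pvCnt 0 = 0 := by simp [pvCnt]

lemma pvCnt_ne (n : Nat) (h : n ≠ 0) :
    pvCnt n = (if 5 ≤ n % 10 then 1 else 0) + pvCnt (n / 10) := by
  rw [pvCnt]; simp [h]

lemma pvCountCore (n : Nat) : ∀ fuel, n < fuel →
    (Nat.toDigitsCore 10 fuel n []).countP (fun c => decide ('5' ≤ c)) = pvCnt n := by
  induction n using Nat.strong_induction_on with
  | _ n ih =>
    intro fuel hfuel
    match fuel with
    | f + 1 =>
      simp only [Nat.toDigitsCore]
      by_cases h : n / 10 = 0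
      · rw [if_pos h]
        by_cases h0 : n = 0
        · subst h0; simp [pvCnt_zero]; decide
        · rw [pvCnt_ne n h0, h, pvCnt_zero]
          simp only [List.countP_cons, List.countP_nil,
            pvDigitChar_ge5 (n % 10) (by omega)]
          split_ifs <;> simp_all
      · rw [if_neg h, pvToDigitsCore_append, List.countP_append,
          ih (n / 10) (by omega) f (by omega), pvCnt_ne n (by omega)]
        simp only [List.countP_cons, List.countP_nil,
          pvDigitChar_ge5 (n % 10) (by omega), decide_eq_true_eq]
        split_ifs <;> omega

lemma pvCountDigits (n : Nat) :
    (Nat.toDigits 10 n).countP (fun c => decide ('5' ≤ c)) = pvCnt n :=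
  pvCountCore n (n + 1) (Nat.lt_succ_self n)

lemma pvLoop_eq (n : Nat) : ∀ (c : Int) (h : (0:Int) ≤ (n : Int)),
    CountLoop (n : Int) c h = c + (pvCnt n : Int) := by
  induction n using Nat.strong_induction_on with
  | _ n ih =>
    intro c h
    rw [CountLoop]
    by_cases h0 : n = 0
    · subst h0; simp [pvCnt_zero]
    · have hne : ((n : Int)) ≠ 0 := by exact_mod_cast h0
      rw [dif_pos hne]
      have hmod : PySem.Int.mod (n : Int) 10 = ((n % 10 : Nat) : Int) := by
        exact_mod_cast PySem.Int.mod_natCast n 10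
      have hdiv : PySem.Int.floordiv (n : Int) 10 = ((n / 10 : Nat) : Int) := by
        exact_mod_cast PySem.Int.floordiv_natCast n 10
      simp only [hmod, hdiv]
      rw [ih (n / 10) (Nat.div_lt_self (Nat.pos_of_ne_zero h0) (by norm_num)),
        pvCnt_ne n h0]
      split_ifs with h1 h2 h2 <;> push_cast <;> omega

lemma pvCountLoop_congr (x y c : Int) (hx : 0 ≤ x) (hy : 0 ≤ y) (hxy : x = y) :
    CountLoop x c hx = CountLoop y c hy := by subst hxy; rfl

lemma pvCount_eq (iNo : Int) : Count iNo = (pvCnt iNo.natAbs : Int) := by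
  rw [Count]
  by_cases h : iNo < 0
  · rw [dif_pos h]
    have hcast : -iNo = ((iNo.natAbs : Nat) : Int) := by omega
    refine (pvCountLoop_congr _ _ _ _ (Int.natCast_nonneg _) hcast).trans ?_
    rw [pvLoop_eq]; ring
  · rw [dif_neg h]
    have hcast : iNo = ((iNo.natAbs : Nat) : Int) := by omega
    refine (pvCountLoop_congr _ _ _ _ (Int.natCast_nonneg _) hcast).trans ?_
    rw [pvLoop_eq]; ring

lemma pvCountAlt_eq (iNo : Int) : Count_alt iNo = (pvCnt iNo.natAbs : Int) := by
  unfold Count_alt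
  rw [PySem.Int.toList_toStr]
  have habs : ¬ (|iNo| < 0) := not_lt.mpr (abs_nonneg _)
  have hnat : |iNo|.toNat = iNo.natAbs := by
    rw [Int.abs_eq_natAbs]; exact Int.toNat_natCast _
  simp only [PySem.Int.toChars, habs, if_false, hnat, pvCountDigits]

-- ===== VERDICT (by name: the statement is the Claim_ definition above) =====
theorem Count_spec : Claim_equal_Count := by
  intro iNo _
  unfold Spec_Count
  rw [pvCount_eq, pvCountAlt_eq]
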